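-- pv_equiv track=rewrite | github.com/Kurdknight/Kurdknight_comfycheck | system_check.py | parse_info_to_dict
-- ===== SOURCE A (Python) =====
-- def parse_info_to_dict(info_lines):
--     """Convert info lines to a structured dictionary"""
--     result = {}
--     current_section = None
--     current_data = {}
--
--     for line in info_lines:
--         if line.startswith("=== ") and line.endswith(" ==="):
--             if current_section:
--                 result[current_section] = current_data
--             current_section = line.strip("= ").strip()
--             current_data = {}
--         elif ":" in line and current_section:
--             key, value = line.split(":", 1)
--             current_data[key.strip()] = value.strip()
--
--     if current_section:
--         result[current_section] = current_data
--
--     return result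
-- ===== SOURCE B (Python) =====
-- def parse_info_to_dict(info_lines):
--     """Convert info lines to a structured dictionary"""
--     # Pass 1: group the lines under their section headers.
--     groups = []
--     current = None
--     for line in info_lines:
--         if line.startswith("=== ") and line.endswith(" ==="):
--             current = (line.strip("= ").strip(), [])
--             groups.append(current)
--         elif current is not None:
--             current[1].append(line)
--     # Pass 2: build the nested dict (falsy names skipped, later duplicates overwrite).
--     result = {}
--     for name, body in groups:
--         if name:
--             result[name] = {k.strip(): v.strip()
--                             for k, v in (l.split(":", 1) for l in body if ":" in l)}
--     return result
-- ===== Notes on version B (the rewrite author's own statement) =====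
-- stated objective: alternative
-- what changed: B replaces A's single stateful loop (current section + accumulated dict, flushed at each header and at the end) with two passes: first group lines under their headers, then build the nested dict from the groups.
import Mathlib
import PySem

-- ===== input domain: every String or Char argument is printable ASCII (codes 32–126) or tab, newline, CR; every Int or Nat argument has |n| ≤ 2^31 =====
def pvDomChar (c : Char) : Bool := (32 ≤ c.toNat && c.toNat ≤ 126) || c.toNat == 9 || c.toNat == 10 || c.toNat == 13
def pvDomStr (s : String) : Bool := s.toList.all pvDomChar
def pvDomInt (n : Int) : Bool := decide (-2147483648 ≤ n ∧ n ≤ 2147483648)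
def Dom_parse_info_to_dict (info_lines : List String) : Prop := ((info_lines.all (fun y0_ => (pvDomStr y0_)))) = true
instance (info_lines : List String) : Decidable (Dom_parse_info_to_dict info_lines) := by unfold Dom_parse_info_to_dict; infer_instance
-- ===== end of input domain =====

-- B replaces A's single stateful loop with a grouping pass followed by a dict-building pass
-- (same cost; a different decomposition). Equivalence of the two is proved below.

-- ===== PORT A =====
-- shared with port B (both Pythons use the very same header test and name expression):
-- line.startswith("=== ") and line.endswith(" ===")
def pvIsHeader (line : String) : Bool :=
  PySem.Str.startswith line "=== " && PySem.Str.endswith line " ==="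
-- line.strip("= ").strip()
def pvSecName (line : String) : String :=
  PySem.Str.strip (PySem.Str.stripChars line "= ")
-- Python truthiness of current_section (None or "" are falsy)
def pvTruthy : Option String → Bool
  | none => false
  | some s => s ≠ ""

-- the body of A's for-loop: state = (result, current_section, current_data)
def pvStepA
    (st : PySem.Dict String (PySem.Dict String String) × Option String × PySem.Dict String String)
    (line : String) :
    PySem.Dict String (PySem.Dict String String) × Option String × PySem.Dict String String :=
  if pvIsHeader line then
    ((if pvTruthy st.2.1 then st.1.insert (st.2.1.getD "") st.2.2 else st.1),
     some (pvSecName line), PySem.Dict.mk [])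
  else if PySem.Str.isIn ":" line && pvTruthy st.2.1 then
    -- key, value = line.split(":", 1)  (guarded by ":" in line, so exactly two parts)
    match PySem.Str.splitMax? line ":" 1 with
    | some (k :: v :: _) => (st.1, st.2.1, st.2.2.insert (PySem.Str.strip k) (PySem.Str.strip v))
    | _ => st
  else st

-- the final 'if current_section: result[current_section] = current_data'
def pvFinishA
    (st : PySem.Dict String (PySem.Dict String String) × Option String × PySem.Dict String String) :
    PySem.Dict String (PySem.Dict String String) :=
  if pvTruthy st.2.1 then st.1.insert (st.2.1.getD "") st.2.2 else st.1

def parse_info_to_dict (info_lines : List String) : List (String × List (String × String)) :=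
  (pvFinishA (info_lines.foldl pvStepA (PySem.Dict.mk [], none, PySem.Dict.mk []))).items.map
    (fun p => (p.1, p.2.items))

-- ===== PORT B =====
-- pass 1, after the first header was seen: current group = (name, body), finished groups in order
def pvGroupsFrom : List String → String → List String → List (String × List String)
  | [], name, body => [(name, body)]
  | l :: ls, name, body =>
    if pvIsHeader l then (name, body) :: pvGroupsFrom ls (pvSecName l) []
    else pvGroupsFrom ls name (body ++ [l])

-- pass 1, before any header (current is None): lines are discarded
def pvGroups : List String → List (String × List String)
  | [] => []
  | l :: ls => if pvIsHeader l then pvGroupsFrom ls (pvSecName l) [] else pvGroups ls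

-- the dict comprehension over one group's body
def pvBuildBody (body : List String) : PySem.Dict String String :=
  body.foldl (fun d l =>
    if PySem.Str.isIn ":" l then
      match PySem.Str.splitMax? l ":" 1 with
      | some (k :: v :: _) => d.insert (PySem.Str.strip k) (PySem.Str.strip v)
      | _ => d
    else d) (PySem.Dict.mk [])

-- pass 2: for name, body in groups: if name: result[name] = {…}
def pvPass2 (res : PySem.Dict String (PySem.Dict String String)) (gs : List (String × List String)) :
    PySem.Dict String (PySem.Dict String String) :=
  gs.foldl (fun res g => if g.1 ≠ "" then res.insert g.1 (pvBuildBody g.2) else res) res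

def parse_info_to_dict_alt (info_lines : List String) : List (String × List (String × String)) :=
  (pvPass2 (PySem.Dict.mk []) (pvGroups info_lines)).items.map (fun p => (p.1, p.2.items))

-- ===== PRECONDITION & SPEC =====
def Spec_parse_info_to_dict (info_lines : List String) (out : List (String × List (String × String))) : Prop := out = parse_info_to_dict_alt info_lines
instance (info_lines : List String) (out : List (String × List (String × String))) : Decidable (Spec_parse_info_to_dict info_lines out) := by unfold Spec_parse_info_to_dict; infer_instance

-- ===== CLAIM (what is proved, stated in full; the proofs are below) =====
def Claim_equal_parse_info_to_dict : Prop := ∀ (info_lines : List String), Dom_parse_info_to_dict info_lines → Spec_parse_info_to_dict info_lines (parse_info_to_dict info_lines)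

-- ===== LEMMAS AND PROOFS =====

-- the dict A accumulates for a section named `name` with body lines `body`
-- (empty when the name is falsy: A never adds keys then)
def pvBodyDict (name : String) (body : List String) : PySem.Dict String String :=
  if name = "" then PySem.Dict.mk [] else pvBuildBody body

theorem pvBuildBody_append (body : List String) (l : String) :
    pvBuildBody (body ++ [l]) =
      (if PySem.Str.isIn ":" l then
        match PySem.Str.splitMax? l ":" 1 with
        | some (k :: v :: _) => (pvBuildBody body).insert (PySem.Str.strip k) (PySem.Str.strip v)
        | _ => pvBuildBody body
      else pvBuildBody body) := by
  simp [pvBuildBody, List.foldl_append]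

-- A's loop from a header-state (some name, pvBodyDict name body) equals pass 2 over the groups
theorem pvLoopA_some (ls : List String) :
    ∀ (res : PySem.Dict String (PySem.Dict String String)) (name : String) (body : List String),
    pvFinishA (ls.foldl pvStepA (res, some name, pvBodyDict name body)) =
      pvPass2 res (pvGroupsFrom ls name body) := by
  induction ls with
  | nil =>
    intro res name body
    by_cases h : name = "" <;>
      simp [pvFinishA, pvTruthy, pvPass2, pvGroupsFrom, pvBodyDict, h]
  | cons l ls ih =>
    intro res name body
    by_cases hh : pvIsHeader l = true
    · have hstep : pvStepA (res, some name, pvBodyDict name body) l =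
        ((if name = "" then res else res.insert name (pvBodyDict name body)),
         some (pvSecName l), pvBodyDict (pvSecName l) []) := by
        by_cases h : name = "" <;>
          simp [pvStepA, pvTruthy, pvBodyDict, pvBuildBody, hh, h]
      rw [List.foldl_cons, hstep, ih]
      by_cases h : name = "" <;>
        simp [pvGroupsFrom, hh, pvPass2, pvBodyDict, h]
    · have hstep : pvStepA (res, some name, pvBodyDict name body) l =
        (res, some name, pvBodyDict name (body ++ [l])) := by
        by_cases h : name = ""
        · simp [pvStepA, pvTruthy, hh, h, pvBodyDict]
        · simp only [pvStepA, hh, Bool.false_eq_true, if_false]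
          by_cases hc : PySem.Chars.isIn [':'] l.toList = true
          · cases hsp : PySem.Str.splitMax? l ":" 1 with
            | none => simp [pvTruthy, hc, h, pvBodyDict, pvBuildBody_append, hsp]
            | some parts =>
              match parts with
              | [] => simp [pvTruthy, hc, h, pvBodyDict, pvBuildBody_append, hsp]
              | [k] => simp [pvTruthy, hc, h, pvBodyDict, pvBuildBody_append, hsp]
              | k :: v :: rest => simp [pvTruthy, hc, h, pvBodyDict, pvBuildBody_append, hsp]
          · simp [pvTruthy, hc, h, pvBodyDict, pvBuildBody_append]
      rw [List.foldl_cons, hstep, ih]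
      simp [pvGroupsFrom, hh]

-- A's loop from the initial state (current_section = None) equals pass 2 over all groups
theorem pvLoopA_none (ls : List String) :
    ∀ (res : PySem.Dict String (PySem.Dict String String)),
    pvFinishA (ls.foldl pvStepA (res, none, PySem.Dict.mk [])) = pvPass2 res (pvGroups ls) := by
  induction ls with
  | nil => intro res; simp [pvFinishA, pvTruthy, pvPass2, pvGroups]
  | cons l ls ih =>
    intro res
    by_cases hh : pvIsHeader l = true
    · have hstep : pvStepA (res, none, PySem.Dict.mk []) l =
        (res, some (pvSecName l), pvBodyDict (pvSecName l) []) := by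
        by_cases h : pvSecName l = "" <;>
          simp [pvStepA, pvTruthy, hh, pvBodyDict, pvBuildBody, h]
      simp [List.foldl_cons, hstep, pvLoopA_some, pvGroups, hh]
    · have hstep : pvStepA (res, none, PySem.Dict.mk []) l = (res, none, PySem.Dict.mk []) := by
        simp [pvStepA, pvTruthy, hh]
      simp [List.foldl_cons, hstep, ih, pvGroups, hh]

-- ===== VERDICT (by name: the statement is the Claim_ definition above) =====
theorem parse_info_to_dict_spec : Claim_equal_parse_info_to_dict := by
  intro info_lines _
  unfold Spec_parse_info_to_dict parse_info_to_dict parse_info_to_dict_alt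
  rw [pvLoopA_none]
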